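-- pv_equiv track=rewrite | github.com/yuna1212/algorithm | 백준/카카오 코드 페스티벌 2018 예선/상금 헌터.py | second_competition
-- ===== SOURCE A (Python) =====
-- def second_competition(rank):
--     if rank == 0:
--         return 0
--     prized_people = [1, 2, 4, 8, 16]
--     prize = [512, 256, 128, 64, 32]
--     for i in range(len(prized_people)):
--         if rank <= sum(prized_people[:i+1]):
--             return prize[i]
--     return 0
-- ===== SOURCE B (Python) =====
-- def _bisect_left(xs, x, lo, hi):
--     # standard bisect_left (A imports nothing, so written by hand)
--     while lo < hi:
--         mid = (lo + hi) // 2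
--         if xs[mid] < x:
--             lo = mid + 1
--         else:
--             hi = mid
--     return lo
--
-- def second_competition(rank):
--     if rank == 0:
--         return 0
--     thresholds = [1, 3, 7, 15, 31]
--     prizes = [512, 256, 128, 64, 32]
--     i = _bisect_left(thresholds, rank, 0, len(thresholds))
--     return prizes[i] if i < len(prizes) else 0
-- ===== Notes on version B (the rewrite author's own statement) =====
-- stated objective: alternative
-- what changed: Replaces the linear scan that recomputes a prefix sum at every step with a precomputed cumulative-threshold table searched once by binary search (bisect_left).
import Mathlib
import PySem

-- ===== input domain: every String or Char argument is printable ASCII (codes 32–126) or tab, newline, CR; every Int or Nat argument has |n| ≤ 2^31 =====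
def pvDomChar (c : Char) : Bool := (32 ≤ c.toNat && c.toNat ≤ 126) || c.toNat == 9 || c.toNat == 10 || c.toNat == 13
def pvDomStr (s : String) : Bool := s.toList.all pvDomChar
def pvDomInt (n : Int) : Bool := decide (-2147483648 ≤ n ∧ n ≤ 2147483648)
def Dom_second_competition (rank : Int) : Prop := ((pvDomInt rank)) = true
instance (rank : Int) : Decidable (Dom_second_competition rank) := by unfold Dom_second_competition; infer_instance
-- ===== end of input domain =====

-- B replaces A's linear scan with repeated prefix-sum recomputation by one binary search over a precomputed cumulative-threshold table (alternative decomposition, same result).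

-- ===== PORT A =====
-- loop 'for i in range(len(prized_people)): if rank <= sum(prized_people[:i+1]): return prize[i]'
-- as first-match recursion over the index list; prized[:i+1] with i ≥ 0 is List.take (i+1).
def secLoop (rank : Int) (prized prize : List Int) : List Nat → Int
  | [] => 0
  | i :: rest =>
    if rank ≤ (prized.take (i+1)).sum then prize.getD i 0
    else secLoop rank prized prize rest

def second_competition (rank : Int) : Int :=
  if rank = 0 then 0
  else
    let prized_people : List Int := [1, 2, 4, 8, 16]
    let prize : List Int := [512, 256, 128, 64, 32]
    secLoop rank prized_people prize (List.range prized_people.length)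

-- ===== PORT B =====
-- hand-written bisect_left from Source B; the while loop runs at most (hi - lo) times,
-- so fuel = hi - lo makes the recursion structural without changing the computation.
def blLoop (xs : List Int) (x : Int) : Nat → Nat → Nat → Nat
  | 0, lo, _ => lo
  | fuel + 1, lo, hi =>
    if lo < hi then
      let mid := (lo + hi) / 2
      if xs.getD mid 0 < x then blLoop xs x fuel (mid + 1) hi
      else blLoop xs x fuel lo mid
    else lo

def second_competition_alt (rank : Int) : Int :=
  if rank = 0 then 0
  else
    let thresholds : List Int := [1, 3, 7, 15, 31]
    let prizes : List Int := [512, 256, 128, 64, 32]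
    let i := blLoop thresholds rank thresholds.length 0 thresholds.length
    if i < prizes.length then prizes.getD i 0 else 0

-- ===== PRECONDITION & SPEC =====
def Spec_second_competition (rank : Int) (out : Int) : Prop := out = second_competition_alt rank
instance (rank : Int) (out : Int) : Decidable (Spec_second_competition rank out) := by unfold Spec_second_competition; infer_instance

-- ===== CLAIM (what is proved, stated in full; the proofs are below) =====
def Claim_equal_second_competition : Prop := ∀ (rank : Int), Dom_second_competition rank → Spec_second_competition rank (second_competition rank)

-- ===== LEMMAS AND PROOFS =====

-- ===== VERDICT (by name: the statement is the Claim_ definition above) =====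
theorem second_competition_spec : Claim_equal_second_competition := by
  intro rank _
  unfold Spec_second_competition second_competition second_competition_alt
  simp only [secLoop, blLoop, List.take, List.sum_cons, List.sum_nil, List.getD, List.range,
    List.range.loop, List.length, List.getElem?_cons_zero, List.getElem?_cons_succ]
  norm_num
  split_ifs <;> simp_all <;> omega
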